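-- pv_equiv track=rewrite | github.com/Freeman97/Chinese-Text-to-SQL | main-model/smbop/dataset_readers/spider.py | table_text_encoding
-- ===== SOURCE A (Python) =====
-- def table_text_encoding(entity_text_list):
--     token_list = []
--     mask_list = []
--     for i, curr in enumerate(entity_text_list):
--         if "::" in curr:  # col
--             token_list.append(curr)
--             if (i + 1) < len(entity_text_list) and "::" in entity_text_list[i + 1]:
--                 token_list.append(",")
--             else:
--                 token_list.append(")\n")
--             mask_list.extend([True, False])
--         else:
--             token_list.append(curr)
--             token_list.append("(")
--             mask_list.extend([True, False])
--
--     return token_list, mask_list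
-- ===== SOURCE B (Python) =====
-- def table_text_encoding(entity_text_list):
--     # Run-based rendering: each element without "::" is a table token opening a
--     # group; each maximal run of consecutive "::" columns is rendered as a
--     # comma-separated group closed by ")\n". Mask is the closed form.
--     xs = entity_text_list
--     n = len(xs)
--     tokens = []
--     i = 0
--     while i < n:
--         if "::" not in xs[i]:
--             tokens += [xs[i], "("]
--             i += 1
--         else:
--             j = i + 1
--             while j < n and "::" in xs[j]:
--                 j += 1
--             for k in range(i, j - 1):
--                 tokens += [xs[k], ","]
--             tokens += [xs[j - 1], ")\n"]
--             i = j
--     return tokens, [True, False] * n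
-- ===== Notes on version B (the rewrite author's own statement) =====
-- stated objective: alternative
-- what changed: Replaces A's element-at-a-time loop with an i+1 lookahead by a run-based algorithm: it scans for maximal runs of consecutive '::' columns and renders each run as a comma-separated group closed by ')\n' (tables rendered as name+'('); the mask is the closed form [True, False] * len.
import Mathlib
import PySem

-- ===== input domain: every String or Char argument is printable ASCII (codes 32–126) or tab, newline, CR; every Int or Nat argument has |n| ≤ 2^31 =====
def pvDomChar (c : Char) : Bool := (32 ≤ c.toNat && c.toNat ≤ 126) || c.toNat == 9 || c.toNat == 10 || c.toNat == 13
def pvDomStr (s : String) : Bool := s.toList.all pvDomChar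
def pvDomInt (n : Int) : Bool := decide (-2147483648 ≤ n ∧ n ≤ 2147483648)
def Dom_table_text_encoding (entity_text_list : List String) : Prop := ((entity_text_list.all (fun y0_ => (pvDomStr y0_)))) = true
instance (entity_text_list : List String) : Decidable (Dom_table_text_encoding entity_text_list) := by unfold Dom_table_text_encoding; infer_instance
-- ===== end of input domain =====

-- B replaces A's one indexed loop with i+1 lookahead by a run-based algorithm (maximal runs of
-- '::' columns rendered as comma-separated groups closed by ")\n") and a closed-form mask
-- (objective: alternative decomposition, same cost).

-- ===== PORT A =====
-- the Python's `entity_text_list[i+1]` is guarded by `(i+1) < len(...)` (short-circuit `and`),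
-- so the lookup is always in range; pyGetD's default "" is never consulted under that guard.
def table_text_encoding (entity_text_list : List String) : List String × List Bool :=
  (PySem.List.enumerate entity_text_list 0).foldl
    (fun (st : List String × List Bool) p =>
      if PySem.Str.isIn "::" p.2 then
        (st.1 ++ [p.2] ++
          [if p.1 + 1 < (entity_text_list.length : Int) ∧
              PySem.Str.isIn "::" (PySem.List.pyGetD entity_text_list (p.1 + 1) "") = true
           then "," else ")\n"],
         st.2 ++ [true, false])
      else
        (st.1 ++ [p.2] ++ ["("], st.2 ++ [true, false]))
    ([], [])

-- ===== PORT B =====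
def pvCol (s : String) : Bool := PySem.Str.isIn "::" s

-- the Python while-loop's inner run scan `while j < n and "::" in xs[j]` is takeWhile/dropWhile
def pvTokens : List String → List String
  | [] => []
  | x :: rest =>
    if pvCol x then
      ((x :: rest.takeWhile pvCol).dropLast.flatMap (fun c => [c, ","]) ++
        [(x :: rest.takeWhile pvCol).getLast (List.cons_ne_nil _ _), ")\n"]) ++
      pvTokens (rest.dropWhile pvCol)
    else
      [x, "("] ++ pvTokens rest
termination_by xs => xs.length
decreasing_by
  · simpa using Nat.lt_succ_of_le (List.length_dropWhile_le pvCol rest)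
  · simp

def table_text_encoding_alt (entity_text_list : List String) : List String × List Bool :=
  (pvTokens entity_text_list,
   (List.replicate entity_text_list.length [true, false]).flatten)

-- ===== PRECONDITION & SPEC =====
def Spec_table_text_encoding (entity_text_list : List String) (out : List String × List Bool) : Prop := out = table_text_encoding_alt entity_text_list
instance (entity_text_list : List String) (out : List String × List Bool) : Decidable (Spec_table_text_encoding entity_text_list out) := by unfold Spec_table_text_encoding; infer_instance

-- ===== CLAIM (what is proved, stated in full; the proofs are below) =====
def Claim_equal_table_text_encoding : Prop := ∀ (entity_text_list : List String), Dom_table_text_encoding entity_text_list → Spec_table_text_encoding entity_text_list (table_text_encoding entity_text_list)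

-- ===== LEMMAS AND PROOFS =====

-- separator of A's lookahead, as a function of the current element and its successor
def pvSep (curr nxt : String) : String :=
  if ¬ PySem.Str.isIn "::" curr then "("
  else if PySem.Str.isIn "::" nxt then "," else ")\n"

-- A's token stream rewritten locally: each element paired with its successor (sentinel "")
def pvZipTok (t : List String) : List String :=
  (t.zip (t.drop 1 ++ [""])).flatMap (fun p => [p.1, pvSep p.1 p.2])

-- A's fold body splits into two independent appending accumulators
theorem pvA_eq_flatMap (xs : List String) :
    table_text_encoding xs =
      ((PySem.List.enumerate xs 0).flatMap
        (fun p => if PySem.Str.isIn "::" p.2 then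
            [p.2, if p.1 + 1 < (xs.length : Int) ∧
                PySem.Str.isIn "::" (PySem.List.pyGetD xs (p.1 + 1) "") = true
              then "," else ")\n"]
          else [p.2, "("]),
       (PySem.List.enumerate xs 0).flatMap (fun _ => [true, false])) := by
  unfold table_text_encoding
  rw [show (fun (st : List String × List Bool) (p : Int × String) =>
      if PySem.Str.isIn "::" p.2 then
        (st.1 ++ [p.2] ++
          [if p.1 + 1 < (xs.length : Int) ∧
              PySem.Str.isIn "::" (PySem.List.pyGetD xs (p.1 + 1) "") = true
           then "," else ")\n"],
         st.2 ++ [true, false])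
      else
        (st.1 ++ [p.2] ++ ["("], st.2 ++ [true, false]))
    = (fun (st : List String × List Bool) (p : Int × String) =>
        (st.1 ++ (if PySem.Str.isIn "::" p.2 then
            [p.2, if p.1 + 1 < (xs.length : Int) ∧
                PySem.Str.isIn "::" (PySem.List.pyGetD xs (p.1 + 1) "") = true
              then "," else ")\n"]
          else [p.2, "("]),
         st.2 ++ [true, false]))
    from by funext st p; split <;> simp]
  rw [PySem.List.foldl_prod_mk
      (f := fun (acc : List String) (p : Int × String) => acc ++
        (if PySem.Str.isIn "::" p.2 then
            [p.2, if p.1 + 1 < (xs.length : Int) ∧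
                PySem.Str.isIn "::" (PySem.List.pyGetD xs (p.1 + 1) "") = true
              then "," else ")\n"]
          else [p.2, "("]))
      (g := fun (acc : List Bool) (_ : Int × String) => acc ++ [true, false])]
  rw [PySem.List.foldl_append_eq_flatMap, PySem.List.foldl_append_eq_flatMap]
  simp

theorem pvMask_eq (xs : List String) (s : Int) :
    (PySem.List.enumerate xs s).flatMap (fun _ => ([true, false] : List Bool)) =
      (List.replicate xs.length [true, false]).flatten := by
  induction xs generalizing s with
  | nil => simp [PySem.List.enumerate_nil]
  | cons c t ih => simp [PySem.List.enumerate_cons, ih, List.replicate_succ]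

-- the token pass: A's absolute-index lookahead equals the local successor-pair form,
-- for any suffix t = xs.drop s of the original list.
theorem pvTok_eq (xs : List String) : ∀ (t : List String) (s : Nat), t = xs.drop s →
    (PySem.List.enumerate t (s : Int)).flatMap
      (fun p => if PySem.Str.isIn "::" p.2 then
          [p.2, if p.1 + 1 < (xs.length : Int) ∧
              PySem.Str.isIn "::" (PySem.List.pyGetD xs (p.1 + 1) "") = true
            then "," else ")\n"]
        else [p.2, "("])
    = (t.zip (xs.drop (s + 1) ++ [""])).flatMap (fun p => [p.1, pvSep p.1 p.2]) := by
  intro t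
  induction t with
  | nil => intro s _; simp [PySem.List.enumerate_nil]
  | cons c t' ih =>
    intro s hdrop
    have hdrop' : xs.drop (s + 1) = t' := by
      have := congrArg (List.drop 1) hdrop.symm
      simpa [List.drop_drop, Nat.add_comm] using this
    have hs : s < xs.length := by
      by_contra h
      rw [List.drop_eq_nil_of_le (by omega)] at hdrop
      exact absurd hdrop (List.cons_ne_nil c t')
    have hget : PySem.List.pyGetD xs ((s : Int) + 1) "" = (t' ++ [""]).headD "" := by
      have h1 : ((s : Int) + 1) = ((s + 1 : Nat) : Int) := by push_cast; ring
      rw [h1, PySem.List.pyGetD_natCast]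
      cases t'' : t' with
      | nil =>
        have : xs.length ≤ s + 1 := by
          have := congrArg List.length hdrop'
          simp [t''] at this; omega
        simp [List.getD_eq_getElem?_getD, List.getElem?_eq_none (by omega)]
      | cons y ys =>
        have : xs[s+1]? = some y := by
          have := congrArg (fun l => l[0]?) hdrop'
          simpa [List.getElem?_drop, t''] using this
        simp [List.getD_eq_getElem?_getD, this]
    have hcond : ((s : Int) + 1 < (xs.length : Int) ∧
        PySem.Str.isIn "::" (PySem.List.pyGetD xs ((s : Int) + 1) "") = true)
        ↔ PySem.Str.isIn "::" ((t' ++ [""]).headD "") = true := by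
      rw [hget]
      constructor
      · exact fun h => h.2
      · intro h
        refine ⟨?_, h⟩
        cases t'' : t' with
        | nil => rw [t''] at h; exact absurd h (by decide)
        | cons y ys =>
          have := congrArg List.length hdrop'
          simp [t''] at this
          omega
    have hzip : (c :: t').zip (xs.drop (s + 1) ++ [""]) =
        (c, (t' ++ [""]).headD "") :: t'.zip ((t' ++ [""]).tail) := by
      rw [hdrop']
      cases t' with
      | nil => rfl
      | cons y ys => rfl
    rw [PySem.List.enumerate_cons, List.flatMap_cons, hzip, List.flatMap_cons]
    have hziptail : t'.zip ((t' ++ [""]).tail) = t'.zip (xs.drop (s + 1 + 1) ++ [""]) := by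
      have hd2 : xs.drop (s + 1 + 1) = t'.drop 1 := by
        rw [← hdrop']; simp [List.drop_drop, Nat.add_comm]
      cases t' with
      | nil => simp
      | cons y ys => simp [hd2]
    have hrec := ih (s + 1) hdrop'.symm
    rw [hziptail]
    have hcast : ((s : Int) + 1) = ((s + 1 : Nat) : Int) := by push_cast; ring
    rw [hcast] at hcond
    rw [hcast, hrec]
    congr 1
    simp only [pvSep]
    by_cases hc : PySem.Str.isIn "::" c = true
    · by_cases hn : PySem.Str.isIn "::" ((t' ++ [""]).headD "") = true
      · rw [if_pos hc, if_pos (hcond.mpr hn), if_neg (not_not_intro hc), if_pos hn]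
      · rw [if_pos hc, if_neg (fun h => hn (hcond.mp h)), if_neg (not_not_intro hc), if_neg hn]
    · rw [if_neg hc, if_pos hc]

theorem pvZipTok_cons (x : String) (rest : List String) :
    pvZipTok (x :: rest) = [x, pvSep x (rest.headD "")] ++ pvZipTok rest := by
  cases rest with
  | nil => simp [pvZipTok]
  | cons y ys => simp [pvZipTok]

-- one maximal column run of the successor-pair form renders as B's run group
theorem pvZipTok_run (x : String) (hx : pvCol x = true) : ∀ (rest : List String),
    pvZipTok (x :: rest) =
      ((x :: rest.takeWhile pvCol).dropLast.flatMap (fun c => [c, ","]) ++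
        [(x :: rest.takeWhile pvCol).getLast (List.cons_ne_nil _ _), ")\n"]) ++
      pvZipTok (rest.dropWhile pvCol) := by
  intro rest
  induction rest generalizing x with
  | nil =>
    have : pvSep x "" = ")\n" := by
      simp [pvSep, pvCol] at hx ⊢
      simp [hx]
      decide
    simp [pvZipTok, this]
  | cons y ys ih =>
    by_cases hy : pvCol y = true
    · have hsep : pvSep x y = "," := by
        simp [pvSep, pvCol] at hx hy ⊢; simp [hx, hy]
      rw [pvZipTok_cons]
      simp only [List.headD_cons, hsep]
      rw [ih y hy]
      simp [hy]
    · have hsep : pvSep x y = ")\n" := by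
        simp [pvSep, pvCol] at hx hy ⊢; simp [hx, hy]
      rw [pvZipTok_cons]
      simp only [List.headD_cons, hsep]
      simp [hy]

-- the successor-pair form equals B's run-based recursion
theorem pvZipTok_eq_tokens (t : List String) : pvZipTok t = pvTokens t := by
  induction t using pvTokens.induct with
  | case1 => simp [pvZipTok, pvTokens]
  | case2 x rest hx ih =>
    rw [pvTokens, if_pos hx, ← ih, pvZipTok_run x hx rest]
  | case3 x rest hx ih =>
    have hsep : pvSep x (rest.headD "") = "(" := by
      simp [pvCol] at hx
      simp [pvSep, hx]
    rw [pvTokens, if_neg hx, pvZipTok_cons, hsep, ih]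

-- ===== VERDICT (by name: the statement is the Claim_ definition above) =====
theorem table_text_encoding_spec : Claim_equal_table_text_encoding := by
  intro xs _
  show table_text_encoding xs = table_text_encoding_alt xs
  rw [pvA_eq_flatMap]
  unfold table_text_encoding_alt
  rw [pvMask_eq xs 0]
  rw [show (0 : Int) = ((0 : Nat) : Int) from rfl, pvTok_eq xs xs 0 (by simp)]
  rw [show xs.drop (0 + 1) = xs.drop 1 from rfl]
  exact congrArg (fun t => (t, _)) (pvZipTok_eq_tokens xs)
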